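-- pv_equiv track=rewrite | github.com/SKywa1kerr/BioAgent | src-python/bioagent/alignment.py | detect_frameshift
-- ===== SOURCE A (Python) =====
-- def ref2pos_to_refpos(ref2_pos_0based: int, ref_len: int, is_circular: bool = True) -> int:
--     """0-based ref2 position -> 1-based original ref position."""
--     if is_circular:
--         return (ref2_pos_0based % ref_len) + 1
--     return ref2_pos_0based + 1
--
-- def detect_frameshift(ref_g: str, qry_g: str, ref2_start: int,
--                       ref_len: int, cds_start: int, cds_end: int,
--                       is_circular: bool = True) -> bool:
--     if cds_start is None or cds_end is None:
--         return False
--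
--     cds_ins = 0
--     cds_del = 0
--     ref2_cursor = ref2_start
--     last_refpos = None
--
--     for a, b in zip(ref_g, qry_g):
--         if a != "-":
--             refpos = ref2pos_to_refpos(ref2_cursor, ref_len, is_circular)
--             last_refpos = refpos
--             ref2_cursor += 1
--             if cds_start <= refpos <= cds_end and b == "-":
--                 cds_del += 1
--         else:
--             if b != "-" and last_refpos is not None:
--                 if cds_start <= last_refpos <= cds_end:
--                     cds_ins += 1
--
--     net_indel = abs(cds_ins - cds_del)
--     if (cds_ins + cds_del) > 0 and (net_indel % 3 != 0):
--         return True
--     return False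
-- ===== SOURCE B (Python) =====
-- def detect_frameshift(ref_g, qry_g, ref2_start, ref_len, cds_start, cds_end, is_circular=True):
--     if cds_start is None or cds_end is None:
--         return False
--     cols = list(zip(ref_g, qry_g))
--     n = len(cols)
--     # skip leading ref-gap columns: insertions there have no anchor reference position
--     j = 0
--     while j < n and cols[j][0] == '-':
--         j += 1
--     # parse the rest into anchored blocks: one non-gap ref column (the anchor)
--     # followed by its run of ref-gap columns; keep only the qry characters
--     blocks = []
--     while j < n:
--         anchor_qry = cols[j][1]
--         j += 1
--         run = []
--         while j < n and cols[j][0] == '-':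
--             run.append(cols[j][1])
--             j += 1
--         blocks.append((anchor_qry, run))
--     # block i's anchor sits at 0-based ref2 position ref2_start + i
--     ins = 0
--     dels = 0
--     for i, (anchor_qry, run) in enumerate(blocks):
--         p = ref2_start + i
--         refpos = p % ref_len + 1 if is_circular else p + 1
--         if cds_start <= refpos <= cds_end:
--             if anchor_qry == '-':
--                 dels += 1
--             ins += sum(1 for b in run if b != '-')
--     return (ins + dels) > 0 and abs(ins - dels) % 3 != 0
-- ===== Notes on version B (the rewrite author's own statement) =====
-- stated objective: alternative
-- what changed: B first parses the alignment into a run-length block structure (each non-gap ref column as an anchor together with its trailing run of ref-gap columns, leading ref-gap columns discarded) and then counts deletions and insertions per block, computing each block's reference position from its block index; A instead classifies columns on the fly in one stateful scan threading a cursor and last_refpos.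
import Mathlib
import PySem

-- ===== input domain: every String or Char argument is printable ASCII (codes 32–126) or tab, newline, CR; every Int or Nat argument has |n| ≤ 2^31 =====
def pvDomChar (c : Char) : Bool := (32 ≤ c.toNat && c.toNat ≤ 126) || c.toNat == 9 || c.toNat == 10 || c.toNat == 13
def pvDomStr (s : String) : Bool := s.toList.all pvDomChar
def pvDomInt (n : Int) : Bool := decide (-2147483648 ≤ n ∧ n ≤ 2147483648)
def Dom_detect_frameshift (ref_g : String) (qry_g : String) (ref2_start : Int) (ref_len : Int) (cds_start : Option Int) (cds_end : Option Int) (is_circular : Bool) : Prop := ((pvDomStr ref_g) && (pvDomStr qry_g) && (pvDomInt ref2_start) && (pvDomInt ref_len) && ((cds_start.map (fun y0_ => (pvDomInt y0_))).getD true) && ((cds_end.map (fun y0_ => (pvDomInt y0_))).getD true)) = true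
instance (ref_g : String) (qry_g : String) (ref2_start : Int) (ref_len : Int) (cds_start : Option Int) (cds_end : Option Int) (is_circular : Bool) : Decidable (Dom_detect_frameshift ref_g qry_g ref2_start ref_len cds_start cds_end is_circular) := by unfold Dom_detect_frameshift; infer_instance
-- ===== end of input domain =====

-- B parses the alignment into anchored blocks (each non-gap ref column plus its trailing
-- ref-gap run) and counts per block by index, instead of A's single stateful column scan
-- (alternative decomposition, same O(n) cost); A = B wherever Python A returns.


-- ===== PORT A =====
def ref2pos_to_refpos (ref2_pos_0based : Int) (ref_len : Int) (is_circular : Bool) : Int :=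
  if is_circular then PySem.Int.mod ref2_pos_0based ref_len + 1 else ref2_pos_0based + 1

-- body of A's for-loop: state = (cds_ins, cds_del, ref2_cursor, last_refpos)
def pvStepA (cs ce ref_len : Int) (circ : Bool)
    (s : Int × Int × Int × Option Int) (ab : Char × Char) : Int × Int × Int × Option Int :=
  let ins := s.1; let del := s.2.1; let cur := s.2.2.1; let last := s.2.2.2
  if ab.1 ≠ '-' then
    let refpos := ref2pos_to_refpos cur ref_len circ
    (ins, (if cs ≤ refpos ∧ refpos ≤ ce ∧ ab.2 = '-' then del + 1 else del),
     cur + 1, some refpos)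
  else
    if ab.2 ≠ '-' then
      match last with
      | some lp => ((if cs ≤ lp ∧ lp ≤ ce then ins + 1 else ins), del, cur, last)
      | none => (ins, del, cur, last)
    else (ins, del, cur, last)

def detect_frameshift (ref_g : String) (qry_g : String) (ref2_start : Int) (ref_len : Int) (cds_start : Option Int) (cds_end : Option Int) (is_circular : Bool) : Bool :=
  match cds_start, cds_end with
  | some cs, some ce =>
    let st := (ref_g.toList.zip qry_g.toList).foldl
      (pvStepA cs ce ref_len is_circular) (0, 0, ref2_start, none)
    decide (st.1 + st.2.1 > 0 ∧ PySem.Int.mod |st.1 - st.2.1| 3 ≠ 0)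
  | _, _ => false

-- ===== PORT B =====
-- inner while of Source B's parser: the run of ref-gap columns (their qry chars) and the rest
def pvRunB : List (Char × Char) → List Char × List (Char × Char)
  | [] => ([], [])
  | (a, b) :: t =>
    if a = '-' then
      let r := pvRunB t
      (b :: r.1, r.2)
    else ([], (a, b) :: t)

theorem pvRunB_len_le : ∀ (t : List (Char × Char)), (pvRunB t).2.length ≤ t.length := by
  intro t
  induction t with
  | nil => simp [pvRunB]
  | cons ab u ih =>
      obtain ⟨a, b⟩ := ab
      by_cases ha : a = '-'
      · simp only [pvRunB, ha, if_true]
        exact Nat.le_succ_of_le ih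
      · simp [pvRunB, ha]

-- outer while of Source B's parser: list of (anchor qry char, trailing-run qry chars)
def pvBlocksB : List (Char × Char) → List (Char × List Char)
  | [] => []
  | (_, b) :: t => (b, (pvRunB t).1) :: pvBlocksB (pvRunB t).2
termination_by cols => cols.length
decreasing_by simpa using Nat.lt_succ_of_le (pvRunB_len_le t)

def detect_frameshift_alt (ref_g : String) (qry_g : String) (ref2_start : Int) (ref_len : Int) (cds_start : Option Int) (cds_end : Option Int) (is_circular : Bool) : Bool :=
  match cds_start with
  | none => false
  | some cs =>
    match cds_end with
    | none => false
    | some ce =>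
      let cols := (ref_g.toList.zip qry_g.toList).dropWhile (fun p => p.1 == '-')
      let blocks := pvBlocksB cols
      let st := (PySem.List.enumerate blocks 0).foldl
        (fun (s : Int × Int) x =>
          let p := ref2_start + x.1
          let refpos := if is_circular then PySem.Int.mod p ref_len + 1 else p + 1
          if cs ≤ refpos ∧ refpos ≤ ce then
            (s.1 + (x.2.2.countP (fun b => decide (b ≠ '-')) : Nat),
             s.2 + (if x.2.1 = '-' then 1 else 0))
          else s) ((0 : Int), (0 : Int))
      decide (st.1 + st.2 > 0 ∧ PySem.Int.mod |st.1 - st.2| 3 ≠ 0)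

-- ===== PRECONDITION & SPEC =====
-- Pre_ excludes exactly the inputs where Python A raises ZeroDivisionError:
-- is_circular with ref_len = 0 and a non-gap ref character among the zipped columns.
def Pre_detect_frameshift (ref_g : String) (qry_g : String) (ref2_start : Int) (ref_len : Int) (cds_start : Option Int) (cds_end : Option Int) (is_circular : Bool) : Prop :=
  is_circular = true → ref_len = 0 →
    ((ref_g.toList.zip qry_g.toList).all (fun p => p.1 == '-')) = true
instance (ref_g : String) (qry_g : String) (ref2_start : Int) (ref_len : Int) (cds_start : Option Int) (cds_end : Option Int) (is_circular : Bool) : Decidable (Pre_detect_frameshift ref_g qry_g ref2_start ref_len cds_start cds_end is_circular) := by unfold Pre_detect_frameshift; infer_instance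
def pvWitness_detect_frameshift : String × String × Int × Int × Option Int × Option Int × Bool :=
  ("A-C", "AA-", 0, 5, some 1, some 10, true)

def Spec_detect_frameshift (ref_g : String) (qry_g : String) (ref2_start : Int) (ref_len : Int) (cds_start : Option Int) (cds_end : Option Int) (is_circular : Bool) (out : Bool) : Prop := out = detect_frameshift_alt ref_g qry_g ref2_start ref_len cds_start cds_end is_circular
instance (ref_g : String) (qry_g : String) (ref2_start : Int) (ref_len : Int) (cds_start : Option Int) (cds_end : Option Int) (is_circular : Bool) (out : Bool) : Decidable (Spec_detect_frameshift ref_g qry_g ref2_start ref_len cds_start cds_end is_circular out) := by unfold Spec_detect_frameshift; infer_instance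

-- ===== CLAIM =====
def Claim_equal_detect_frameshift : Prop := ∀ (ref_g : String) (qry_g : String) (ref2_start : Int) (ref_len : Int) (cds_start : Option Int) (cds_end : Option Int) (is_circular : Bool), Dom_detect_frameshift ref_g qry_g ref2_start ref_len cds_start cds_end is_circular → Pre_detect_frameshift ref_g qry_g ref2_start ref_len cds_start cds_end is_circular → Spec_detect_frameshift ref_g qry_g ref2_start ref_len cds_start cds_end is_circular (detect_frameshift ref_g qry_g ref2_start ref_len cds_start cds_end is_circular)

-- ===== LEMMAS AND PROOFS =====

-- B's per-block counts (ins, del) for blocks starting at block index k, recursively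
def pvBCount (cs ce ref2_start ref_len : Int) (circ : Bool) :
    List (Char × List Char) → Int → Int × Int
  | [], _ => (0, 0)
  | (anchor, run) :: t, k =>
    let refpos := if circ then PySem.Int.mod (ref2_start + k) ref_len + 1 else (ref2_start + k) + 1
    let rest := pvBCount cs ce ref2_start ref_len circ t (k + 1)
    if cs ≤ refpos ∧ refpos ≤ ce then
      (rest.1 + (run.countP (fun b => decide (b ≠ '-')) : Nat),
       rest.2 + (if anchor = '-' then 1 else 0))
    else rest

theorem pvBCount_fold (cs ce ref2_start ref_len : Int) (circ : Bool)
    (blocks : List (Char × List Char)) :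
    ∀ (k ins del : Int),
      (PySem.List.enumerate blocks k).foldl
        (fun (s : Int × Int) x =>
          let p := ref2_start + x.1
          let refpos := if circ then PySem.Int.mod p ref_len + 1 else p + 1
          if cs ≤ refpos ∧ refpos ≤ ce then
            (s.1 + (x.2.2.countP (fun b => decide (b ≠ '-')) : Nat),
             s.2 + (if x.2.1 = '-' then 1 else 0))
          else s) (ins, del)
      = (ins + (pvBCount cs ce ref2_start ref_len circ blocks k).1,
         del + (pvBCount cs ce ref2_start ref_len circ blocks k).2) := by
  induction blocks with
  | nil => intro k ins del; simp [pvBCount, PySem.List.enumerate_nil]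
  | cons blk t ih =>
      intro k ins del
      obtain ⟨anchor, run⟩ := blk
      rw [PySem.List.enumerate_cons, List.foldl_cons]
      simp only [pvBCount]
      by_cases hc : cs ≤ (if circ then PySem.Int.mod (ref2_start + k) ref_len + 1 else (ref2_start + k) + 1) ∧
          (if circ then PySem.Int.mod (ref2_start + k) ref_len + 1 else (ref2_start + k) + 1) ≤ ce
      · rw [if_pos hc]
        simp only [if_pos hc]
        rw [ih]
        refine Prod.ext ?_ ?_ <;> simp only <;> ring
      · rw [if_neg hc]
        simp only [if_neg hc]
        exact ih (k + 1) ins del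

def pvLast (ref2_start ref_len : Int) (circ : Bool) (k : Nat) : Option Int :=
  if k = 0 then none else some (ref2pos_to_refpos (ref2_start + (k : Int) - 1) ref_len circ)

-- A's loop ignores leading ref-gap columns (last_refpos is still None there)
theorem foldA_leading (cs ce ref_len : Int) (circ : Bool) :
    ∀ (L : List (Char × Char)), (∀ p ∈ L, p.1 = '-') →
      ∀ (ins del cur : Int),
        L.foldl (pvStepA cs ce ref_len circ) (ins, del, cur, none) = (ins, del, cur, none) := by
  intro L
  induction L with
  | nil => intro _ ins del cur; rfl
  | cons ab t ih =>
      intro hall ins del cur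
      obtain ⟨a, b⟩ := ab
      have ha : a = '-' := hall (a, b) (List.mem_cons_self ..)
      have hstep : pvStepA cs ce ref_len circ (ins, del, cur, none) (a, b) = (ins, del, cur, none) := by
        subst ha
        by_cases hb : b = '-' <;> simp [pvStepA, hb]
      rw [List.foldl_cons, hstep]
      exact ih (fun p hp => hall p (List.mem_cons_of_mem _ hp)) ins del cur

-- A's loop over a run of ref-gap columns with a known last_refpos counts its non-gap qry chars
theorem foldA_run (cs ce ref_len : Int) (circ : Bool) :
    ∀ (rs : List Char) (ins del cur lp : Int),
      (rs.map (fun b => ('-', b))).foldl (pvStepA cs ce ref_len circ) (ins, del, cur, some lp)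
      = (ins + (if cs ≤ lp ∧ lp ≤ ce then ((rs.countP (fun b => decide (b ≠ '-')) : Nat) : Int) else 0),
         del, cur, some lp) := by
  intro rs
  induction rs with
  | nil => intro ins del cur lp; simp
  | cons b t ih =>
      intro ins del cur lp
      rw [List.map_cons, List.foldl_cons]
      by_cases hb : b = '-'
      · have hstep : pvStepA cs ce ref_len circ (ins, del, cur, some lp) ('-', b)
            = (ins, del, cur, some lp) := by simp [pvStepA, hb]
        rw [hstep, ih, List.countP_cons]
        simp [hb]
      · by_cases hc : cs ≤ lp ∧ lp ≤ ce
        · have hstep : pvStepA cs ce ref_len circ (ins, del, cur, some lp) ('-', b)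
              = (ins + 1, del, cur, some lp) := by simp [pvStepA, hb, hc]
          rw [hstep, ih, List.countP_cons]
          simp only [if_pos hc, hb, ne_eq, not_false_eq_true, decide_true, if_true,
            Prod.mk.injEq, and_true]
          push_cast
          ring
        · have hstep : pvStepA cs ce ref_len circ (ins, del, cur, some lp) ('-', b)
              = (ins, del, cur, some lp) := by simp [pvStepA, hb, hc]
          rw [hstep, ih, List.countP_cons]
          simp [hc]

theorem pvRunB_decomp : ∀ (t : List (Char × Char)),
    t = (pvRunB t).1.map (fun b => ('-', b)) ++ (pvRunB t).2 := by
  intro t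
  induction t with
  | nil => rfl
  | cons ab u ih =>
      obtain ⟨a, b⟩ := ab
      by_cases ha : a = '-'
      · simp only [pvRunB, ha, if_true, List.map_cons, List.cons_append]
        exact congrArg _ ih
      · simp [pvRunB, ha]

theorem pvRunB_rest_head : ∀ (t : List (Char × Char)) (a : Char) (b : Char) (u : List (Char × Char)),
    (pvRunB t).2 = (a, b) :: u → a ≠ '-' := by
  intro t
  induction t with
  | nil => intro a b u h; simp [pvRunB] at h
  | cons ab v ih =>
      obtain ⟨x, y⟩ := ab
      intro a b u h
      by_cases hx : x = '-'
      · simp only [pvRunB, hx, if_true] at h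
        exact ih a b u h
      · simp only [pvRunB, hx, if_false] at h
        obtain ⟨h1, _⟩ := Prod.mk.injEq .. ▸ (List.cons.injEq .. ▸ h).1
        exact h1 ▸ hx

-- the main invariant: A's fold over block-structured columns equals B's per-block counts
theorem foldA_blocks (cs ce ref2_start ref_len : Int) (circ : Bool) :
    ∀ (n : Nat) (cols : List (Char × Char)), cols.length ≤ n →
      (∀ a b t, cols = (a, b) :: t → a ≠ '-') →
      ∀ (ins del : Int) (k : Nat),
        cols.foldl (pvStepA cs ce ref_len circ)
          (ins, del, ref2_start + (k : Int), pvLast ref2_start ref_len circ k)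
        = (ins + (pvBCount cs ce ref2_start ref_len circ (pvBlocksB cols) (k : Int)).1,
           del + (pvBCount cs ce ref2_start ref_len circ (pvBlocksB cols) (k : Int)).2,
           ref2_start + (k : Int) + ((pvBlocksB cols).length : Int),
           pvLast ref2_start ref_len circ (k + (pvBlocksB cols).length)) := by
  intro n
  induction n with
  | zero =>
      intro cols hlen _ ins del k
      have : cols = [] := List.length_eq_zero_iff.mp (Nat.le_zero.mp hlen)
      subst this
      simp [pvBlocksB, pvBCount]
  | succ m ih =>
      intro cols hlen hhead ins del k
      match cols with
      | [] => simp [pvBlocksB, pvBCount]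
      | (a, b) :: t =>
        have ha : a ≠ '-' := hhead a b t rfl
        have hrefpos : ref2pos_to_refpos (ref2_start + (k : Int)) ref_len circ
            = ref2pos_to_refpos (ref2_start + ((k + 1 : Nat) : Int) - 1) ref_len circ := by
          congr 1; push_cast; ring
        have hlastk1 : some (ref2pos_to_refpos (ref2_start + (k : Int)) ref_len circ)
            = pvLast ref2_start ref_len circ (k + 1) := by
          rw [hrefpos]; simp [pvLast]
        set rp := ref2pos_to_refpos (ref2_start + (k : Int)) ref_len circ with hrp
        have hstep : pvStepA cs ce ref_len circ
            (ins, del, ref2_start + (k : Int), pvLast ref2_start ref_len circ k) (a, b)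
            = (ins, (if cs ≤ rp ∧ rp ≤ ce ∧ b = '-' then del + 1 else del),
               ref2_start + ((k + 1 : Nat) : Int), pvLast ref2_start ref_len circ (k + 1)) := by
          simp only [pvStepA, ha, ne_eq, not_false_eq_true, if_true, ← hrp, hlastk1]
          refine Prod.ext rfl (Prod.ext rfl (Prod.ext ?_ rfl))
          simp only
          push_cast; ring
        rw [List.foldl_cons, hstep]
        -- split t into the gap run and the rest
        have hdec := pvRunB_decomp t
        set rs := (pvRunB t).1 with hrs
        set rest := (pvRunB t).2 with hrest
        have hcur1 : ref2_start + ((k + 1 : Nat) : Int) = ref2_start + (k : Int) + 1 := by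
          push_cast; ring
        have hlast1 : pvLast ref2_start ref_len circ (k + 1) = some rp := hlastk1.symm
        conv_lhs => rw [hdec]
        rw [List.foldl_append, hlast1, foldA_run]
        rw [← hlast1]
        have hrestlen : rest.length ≤ m := by
          have h1 := pvRunB_len_le t
          have h2 : t.length ≤ m := by simpa using hlen
          have h3 : rs.length ≤ rs.length := le_refl _
          calc rest.length ≤ t.length := by rw [hrest]; exact h1
            _ ≤ m := h2
        have hresthead : ∀ a' b' t', rest = (a', b') :: t' → a' ≠ '-' := by
          intro a' b' t' h
          exact pvRunB_rest_head t a' b' t' (hrest ▸ h)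
        rw [ih rest hrestlen hresthead _ _ (k + 1)]
        -- unfold pvBlocksB on the cons and pvBCount on the resulting block
        have hblocks : pvBlocksB ((a, b) :: t) = (b, rs) :: pvBlocksB rest := by
          rw [pvBlocksB]
        rw [hblocks]
        simp only [pvBCount, List.length_cons]
        set R := pvBCount cs ce ref2_start ref_len circ (pvBlocksB rest) ((k : Int) + 1) with hR
        have hk1 : ((k + 1 : Nat) : Int) = (k : Int) + 1 := by push_cast; ring
        rw [hk1]
        have hrpform : rp = if circ then PySem.Int.mod (ref2_start + (k : Int)) ref_len + 1
            else (ref2_start + (k : Int)) + 1 := by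
          rw [hrp, ref2pos_to_refpos]
        by_cases hc : cs ≤ rp ∧ rp ≤ ce
        · have hc' : cs ≤ (if circ then PySem.Int.mod (ref2_start + (k : Int)) ref_len + 1 else (ref2_start + (k : Int)) + 1) ∧
              (if circ then PySem.Int.mod (ref2_start + (k : Int)) ref_len + 1 else (ref2_start + (k : Int)) + 1) ≤ ce := by
            rw [← hrpform]; exact hc
          rw [if_pos hc, if_pos hc']
          refine Prod.ext ?_ (Prod.ext ?_ (Prod.ext ?_ ?_))
          · simp only
            ring
          · simp only
            by_cases hb : b = '-'
            · rw [if_pos ⟨hc.1, hc.2, hb⟩, if_pos hb]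
              push_cast; ring
            · rw [if_neg (by rintro ⟨_, _, h⟩; exact hb h), if_neg hb]
              push_cast; ring
          · simp only
            push_cast; ring
          · simp only
            congr 1
            omega
        · have hc' : ¬ (cs ≤ (if circ then PySem.Int.mod (ref2_start + (k : Int)) ref_len + 1 else (ref2_start + (k : Int)) + 1) ∧
              (if circ then PySem.Int.mod (ref2_start + (k : Int)) ref_len + 1 else (ref2_start + (k : Int)) + 1) ≤ ce) := by
            rw [← hrpform]; exact hc
          have hb' : ¬ (cs ≤ rp ∧ rp ≤ ce ∧ b = '-') := by
            rintro ⟨h1, h2, _⟩; exact hc ⟨h1, h2⟩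
          rw [if_neg hc, if_neg hc', if_neg hb']
          refine Prod.ext ?_ (Prod.ext ?_ (Prod.ext ?_ ?_))
          · simp only; ring
          · rfl
          · simp only; push_cast; ring
          · simp only; congr 1; omega

theorem dropWhile_head_false {α : Type} (q : α → Bool) :
    ∀ (l : List α) (x : α) (t : List α), l.dropWhile q = x :: t → q x = false := by
  intro l
  induction l with
  | nil => intro x t h; simp [List.dropWhile] at h
  | cons y u ih =>
      intro x t h
      by_cases hy : q y = true
      · rw [List.dropWhile_cons_of_pos hy] at h
        exact ih x t h
      · rw [List.dropWhile_cons_of_neg hy] at h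
        obtain ⟨h1, _⟩ := List.cons.injEq .. ▸ h
        subst h1
        exact Bool.eq_false_iff.mpr hy

-- ===== VERDICT =====
theorem detect_frameshift_spec : Claim_equal_detect_frameshift := by
  intro ref_g qry_g ref2_start ref_len cds_start cds_end is_circular _ _
  unfold Spec_detect_frameshift detect_frameshift detect_frameshift_alt
  match cds_start, cds_end with
  | none, _ => rfl
  | some cs, none => rfl
  | some cs, some ce =>
    simp only
    set cols0 := ref_g.toList.zip qry_g.toList with hcols0
    set q : Char × Char → Bool := fun p => p.1 == '-' with hq
    have hsplit : cols0 = cols0.takeWhile q ++ cols0.dropWhile q :=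
      (List.takeWhile_append_dropWhile).symm
    have hlead : ∀ p ∈ cols0.takeWhile q, p.1 = '-' := by
      intro p hp
      have := List.mem_takeWhile_imp hp
      simpa [hq] using this
    conv_lhs => rw [hsplit]
    rw [List.foldl_append,
      foldA_leading cs ce ref_len is_circular (cols0.takeWhile q) hlead 0 0 ref2_start]
    have h0 : (0, 0, ref2_start, (none : Option Int))
        = ((0 : Int), (0 : Int), ref2_start + ((0 : Nat) : Int),
           pvLast ref2_start ref_len is_circular 0) := by
      simp [pvLast]
    rw [h0]
    have hhead : ∀ a b t, cols0.dropWhile q = (a, b) :: t → a ≠ '-' := by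
      intro a b t h
      have := dropWhile_head_false q (cols0) (a, b) t h
      simpa [hq] using this
    rw [foldA_blocks cs ce ref2_start ref_len is_circular (cols0.dropWhile q).length
      (cols0.dropWhile q) (le_refl _) hhead 0 0 0]
    rw [pvBCount_fold cs ce ref2_start ref_len is_circular
      (pvBlocksB (cols0.dropWhile q)) 0 0 0]
    norm_num
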